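-- pv_equiv track=rewrite | github.com/fortunellimatteo/Python_trial | esercizio7_cifrario.py | basic_rot
-- ===== SOURCE A (Python) =====
-- cifrario = {'a': 'n', 'b': 'o', 'c': 'p', 'd': 'q', 'e': 'r', 'f': 's', 'g': 't', 'h': 'u',
--             'i': 'v', 'j': 'w', 'k': 'x', 'l': 'y', 'm': 'z', 'n': 'a', 'o': 'b', 'p': 'c',
--             'q': 'd', 'r': 'e', 's': 'f', 't': 'g', 'u': 'h', 'v': 'i', 'w': 'j', 'x': 'k',
--             'y': 'l', 'z': 'm', 'A': 'N', 'B': 'O', 'C': 'P', 'D': 'Q', 'E': 'R', 'F': 'S',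
--             'G': 'T', 'H': 'U', 'I': 'V', 'J': 'W', 'K': 'X', 'L': 'Y', 'M': 'Z', 'N': 'A',
--             'O': 'B', 'P': 'C', 'Q': 'D', 'R': 'E', 'S': 'F', 'T': 'G', 'U': 'H', 'V': 'I',
--             'W': 'J', 'X': 'K', 'Y': 'L', 'Z': 'M'}
--
-- def basic_rot(stringa):
--     nuova_stringa = ""
--     for carattere in stringa:
--         if carattere in cifrario:
--             nuova_stringa += cifrario[carattere]
--         else:
--             nuova_stringa += carattere
--     return nuova_stringa
-- ===== SOURCE B (Python) =====
-- def basic_rot(stringa):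
--     out = []
--     for c in stringa:
--         if 'a' <= c <= 'z':
--             out.append(chr((ord(c) - ord('a') + 13) % 26 + ord('a')))
--         elif 'A' <= c <= 'Z':
--             out.append(chr((ord(c) - ord('A') + 13) % 26 + ord('A')))
--         else:
--             out.append(c)
--     return ''.join(out)
-- ===== Notes on version B (the rewrite author's own statement) =====
-- stated objective: idiomatic
-- what changed: B drops the 52-entry substitution dict and computes ROT13 arithmetically per character (modular shift within a-z / A-Z, others unchanged), appending to a list joined at the end instead of repeated string concatenation.
import Mathlib
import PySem

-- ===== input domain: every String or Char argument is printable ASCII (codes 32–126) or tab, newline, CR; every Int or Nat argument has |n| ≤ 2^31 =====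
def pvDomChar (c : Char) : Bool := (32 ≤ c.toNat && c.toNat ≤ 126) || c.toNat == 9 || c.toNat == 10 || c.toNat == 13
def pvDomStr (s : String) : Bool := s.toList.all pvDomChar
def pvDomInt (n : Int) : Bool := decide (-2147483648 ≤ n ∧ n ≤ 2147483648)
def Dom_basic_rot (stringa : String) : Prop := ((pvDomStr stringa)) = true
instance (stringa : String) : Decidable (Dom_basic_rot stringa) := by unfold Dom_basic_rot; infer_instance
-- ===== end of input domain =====

-- B replaces A's 52-entry ROT13 lookup table with per-character modular arithmetic on
-- the two letter ranges (idiomatic; same O(n) cost, no table).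

-- ===== PORT A =====
-- the module-level dict `cifrario`
def cifrario : PySem.Dict Char Char := PySem.Dict.mk
  [('a','n'),('b','o'),('c','p'),('d','q'),('e','r'),('f','s'),('g','t'),('h','u'),
   ('i','v'),('j','w'),('k','x'),('l','y'),('m','z'),('n','a'),('o','b'),('p','c'),
   ('q','d'),('r','e'),('s','f'),('t','g'),('u','h'),('v','i'),('w','j'),('x','k'),
   ('y','l'),('z','m'),('A','N'),('B','O'),('C','P'),('D','Q'),('E','R'),('F','S'),
   ('G','T'),('H','U'),('I','V'),('J','W'),('K','X'),('L','Y'),('M','Z'),('N','A'),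
   ('O','B'),('P','C'),('Q','D'),('R','E'),('S','F'),('T','G'),('U','H'),('V','I'),
   ('W','J'),('X','K'),('Y','L'),('Z','M')]

def basic_rot (stringa : String) : String :=
  String.mk (stringa.toList.foldl
    (fun nuova c =>
      if cifrario.contains c then nuova ++ [(cifrario.get? c).getD c]
      else nuova ++ [c])
    [])

-- ===== PORT B =====
-- one character of B's loop body
def rotChar (c : Char) : Char :=
  if 'a' ≤ c ∧ c ≤ 'z' then Char.ofNat ((c.toNat - 'a'.toNat + 13) % 26 + 'a'.toNat)
  else if 'A' ≤ c ∧ c ≤ 'Z' then Char.ofNat ((c.toNat - 'A'.toNat + 13) % 26 + 'A'.toNat)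
  else c

def basic_rot_alt (stringa : String) : String :=
  String.mk (stringa.toList.foldl (fun out c => out ++ [rotChar c]) [])

-- ===== PRECONDITION & SPEC =====
def Spec_basic_rot (stringa : String) (out : String) : Prop := out = basic_rot_alt stringa
instance (stringa : String) (out : String) : Decidable (Spec_basic_rot stringa out) := by unfold Spec_basic_rot; infer_instance

-- ===== CLAIM (what is proved, stated in full; the proofs are below) =====
def Claim_equal_basic_rot : Prop := ∀ (stringa : String), Dom_basic_rot stringa → Spec_basic_rot stringa (basic_rot stringa)

-- ===== LEMMAS AND PROOFS =====
-- A's per-character step, named so the foldl bodies can be compared pointwise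
def tableChar (c : Char) : Char :=
  if cifrario.contains c then (cifrario.get? c).getD c else c

-- table lookup and range arithmetic agree on every ASCII character (checked by decide on codes 0..127)
set_option maxRecDepth 8192 in
theorem tableChar_eq_rotChar (c : Char) (h : pvDomChar c = true) : tableChar c = rotChar c := by
  have hall : ∀ n ∈ List.range 128, tableChar (Char.ofNat n) = rotChar (Char.ofNat n) := by decide
  have hc : c.toNat < 128 := by
    simp [pvDomChar] at h
    omega
  have := hall c.toNat (List.mem_range.mpr hc)
  rwa [Char.ofNat_toNat] at this

theorem basic_rot_spec : Claim_equal_basic_rot := by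
  intro s hdom
  unfold Spec_basic_rot basic_rot basic_rot_alt
  have hmem : ∀ c ∈ s.toList, pvDomChar c = true := by
    simpa [Dom_basic_rot, pvDomStr, List.all_eq_true] using hdom
  congr 1
  calc s.toList.foldl (fun nuova c => if cifrario.contains c then nuova ++ [(cifrario.get? c).getD c] else nuova ++ [c]) []
      = s.toList.foldl (fun nuova c => nuova ++ [tableChar c]) [] := by
        have hfun : (fun (nuova : List Char) (c : Char) =>
            if cifrario.contains c then nuova ++ [(cifrario.get? c).getD c] else nuova ++ [c])
            = fun (nuova : List Char) (c : Char) => nuova ++ [tableChar c] := by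
          funext a c
          simp only [tableChar, apply_ite (a ++ [·])]
        rw [hfun]
    _ = [] ++ s.toList.map tableChar := PySem.List.foldl_append_singleton_eq_map tableChar s.toList []
    _ = [] ++ s.toList.map rotChar := by
        simp only [List.nil_append]
        exact List.map_congr_left fun c hc => tableChar_eq_rotChar c (hmem c hc)
    _ = s.toList.foldl (fun out c => out ++ [rotChar c]) [] :=
        (PySem.List.foldl_append_singleton_eq_map rotChar s.toList []).symm
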